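-- pv_equiv track=rewrite | github.com/bezruchkodasha2107/homework5 | lesson8/task5.py | count_char
-- ===== SOURCE A (Python) =====
-- def count_char(frase):
--     dict_frase = {}
--
--     for i in frase:
--         if i in dict_frase:
--            dict_frase[i] += 1
--         elif i == ' ':
--             continue
--         else:
--            dict_frase[i] = 1
--     return dict_frase
-- ===== SOURCE B (Python) =====
-- def count_char(frase):
--     chars = [c for c in frase if c != ' ']
--     return {c: chars.count(c) for c in dict.fromkeys(chars)}
-- ===== Notes on version B (the rewrite author's own statement) =====
-- stated objective: simpler
-- what changed: Replaces the single accumulating dict-update pass with a distinct-then-rescan strategy: filter out spaces, take the distinct characters in first-occurrence order (dict.fromkeys), and build the result by counting each distinct character with list.count.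
import Mathlib
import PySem

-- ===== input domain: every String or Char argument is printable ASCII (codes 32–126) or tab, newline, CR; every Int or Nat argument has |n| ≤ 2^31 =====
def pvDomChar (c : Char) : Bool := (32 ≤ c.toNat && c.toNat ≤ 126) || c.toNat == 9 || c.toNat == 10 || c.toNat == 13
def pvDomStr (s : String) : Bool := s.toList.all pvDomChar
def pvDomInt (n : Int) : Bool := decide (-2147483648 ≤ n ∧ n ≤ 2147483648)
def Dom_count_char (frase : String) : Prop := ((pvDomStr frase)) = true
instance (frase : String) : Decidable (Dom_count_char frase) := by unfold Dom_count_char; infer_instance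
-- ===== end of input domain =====

-- B replaces A's single accumulating dict-update pass by a distinct-then-rescan strategy
-- (filter spaces, dedup in first-occurrence order, count each distinct character); objective: simpler.


-- ===== PORT A =====
-- dict keys are the characters of frase (1-char strings in Python); the Dict is kept
-- Char-keyed and each key rendered as its 1-char String at the return boundary.
def count_char (frase : String) : List (String × Int) :=
  (frase.toList.foldl
      (fun (d : PySem.Dict Char Int) i =>
        if d.contains i then d.modify i 0 (· + 1)
        else if i = ' ' then d
        else d.insert i 1)
      PySem.Dict.empty).items.map (fun p => (String.singleton p.1, p.2))

-- ===== PORT B =====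
def count_char_alt (frase : String) : List (String × Int) :=
  let chars := frase.toList.filter (fun c => c != ' ')
  (PySem.List.dedup chars).map (fun c => (String.singleton c, (chars.count c : Int)))

-- ===== PRECONDITION & SPEC =====
def Spec_count_char (frase : String) (out : List (String × Int)) : Prop := out = count_char_alt frase
instance (frase : String) (out : List (String × Int)) : Decidable (Spec_count_char frase out) := by unfold Spec_count_char; infer_instance

-- ===== CLAIM (what is proved, stated in full; the proofs are below) =====
def Claim_equal_count_char : Prop := ∀ (frase : String), Dom_count_char frase → Spec_count_char frase (count_char frase)

-- ===== LEMMAS AND PROOFS =====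

-- A's loop over any dict not containing ' ' is Counter-style modify over the space-filtered list.
lemma countA_fold_eq (cs : List Char) (d : PySem.Dict Char Int) (h : d.contains ' ' = false) :
    cs.foldl
      (fun (d : PySem.Dict Char Int) i =>
        if d.contains i then d.modify i 0 (· + 1)
        else if i = ' ' then d
        else d.insert i 1) d
    = (cs.filter (fun c => c != ' ')).foldl (fun d x => d.modify x 0 (· + 1)) d := by
  induction cs generalizing d with
  | nil => rfl
  | cons c cs ih =>
    by_cases hc : c = ' '
    · subst hc
      simp only [List.foldl_cons, h, List.filter_cons]
      simpa using ih d h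
    · have hstep :
          (if d.contains c = true then d.modify c 0 (· + 1)
           else if c = ' ' then d else d.insert c 1) = d.modify c 0 (· + 1) := by
        by_cases hd : d.contains c
        · simp [hd]
        · simp only [Bool.not_eq_true] at hd
          simp [hd, hc, PySem.Dict.modify, PySem.Dict.getD_of_not_contains d 0 hd]
      have hpres : (d.modify c 0 (· + 1)).contains ' ' = false := by
        simp [PySem.Dict.contains_modify, h]
        exact fun hcc => hc hcc.symm
      simp only [List.foldl_cons, List.filter_cons]
      rw [hstep]
      simpa [hc] using ih (d.modify c 0 (· + 1)) hpres

-- ===== VERDICT (by name: the statement is the Claim_ definition above) =====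
theorem count_char_spec : Claim_equal_count_char := by
  intro frase _
  unfold Spec_count_char count_char count_char_alt
  rw [countA_fold_eq _ _ (by simp [PySem.Dict.contains_empty])]
  rw [show (frase.toList.filter (fun c => c != ' ')).foldl
        (fun (d : PySem.Dict Char Int) x => d.modify x 0 (· + 1)) PySem.Dict.empty
      = PySem.Dict.counter (frase.toList.filter (fun c => c != ' ')) from rfl]
  simp [PySem.Dict.items_counter, PySem.List.dedup_eq_ofList]
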